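-- pv_equiv track=rewrite | github.com/Jianbao233/STS2_mod | MP_PlayerManager_v2/steam_api.py | _tokenize_vdf
-- ===== SOURCE A (Python) =====
-- def _tokenize_vdf(content: str) -> list[str]:
--     """扫描文件，提取所有 token（含 { } 裸标记）"""
--     tokens: list[str] = []
--     i = 0
--     n = len(content)
--
--     while i < n:
--         if content[i] == '/' and i + 1 < n and content[i + 1] == '/':
--             eol = content.find('\n', i)
--             i = eol + 1 if eol != -1 else n
--             continue
--         if content[i] == '/' and i + 1 < n and content[i + 1] == '*':
--             end = content.find('*/', i + 2)
--             i = end + 2 if end != -1 else n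
--             continue
--         if content[i] in ' \t\r':
--             i += 1
--             continue
--         if content[i] == '\n':
--             i += 1
--             continue
--         if content[i] in '{}':
--             tokens.append(content[i])
--             i += 1
--             continue
--         if content[i] == '"':
--             i += 1
--             chars: list[str] = []
--             while i < n:
--                 c = content[i]
--                 if c == '\\':
--                     i += 1
--                     if i < n:
--                         nc = content[i]
--                         es = {"n": "\n", "t": "\t", "r": "\r",
--                               "\\": "\\", '"': '"'}.get(nc, nc)
--                         chars.append(es)
--                         i += 1
--                     continue
--                 if c == '"':
--                     i += 1
--                     break
--                 chars.append(c)
--                 i += 1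
--             tokens.append("".join(chars))
--             continue
--         i += 1
--     return tokens
-- ===== SOURCE B (Python) =====
-- def _tokenize_vdf(content: str) -> list[str]:
--     """One-pass DFA tokenizer: states NORMAL/SLASH/LINE/BLOCK/STAR/STRING/ESC."""
--     NORMAL, SLASH, LINE, BLOCK, STAR, STRING, ESC = range(7)
--     ESC_MAP = {"n": "\n", "t": "\t", "r": "\r"}
--     tokens: list[str] = []
--     buf: list[str] = []
--     state = NORMAL
--     for c in content:
--         if state == NORMAL:
--             if c == '/':
--                 state = SLASH
--             elif c == '"':
--                 buf = []
--                 state = STRING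
--             elif c in '{}':
--                 tokens.append(c)
--         elif state == SLASH:
--             if c == '/':
--                 state = LINE
--             elif c == '*':
--                 state = BLOCK
--             elif c == '"':
--                 buf = []
--                 state = STRING
--             elif c in '{}':
--                 tokens.append(c)
--                 state = NORMAL
--             else:
--                 state = NORMAL
--         elif state == LINE:
--             if c == '\n':
--                 state = NORMAL
--         elif state == BLOCK:
--             if c == '*':
--                 state = STAR
--         elif state == STAR:
--             if c == '/':
--                 state = NORMAL
--             elif c != '*':
--                 state = BLOCK
--         elif state == STRING:
--             if c == '\\':
--                 state = ESC
--             elif c == '"':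
--                 tokens.append(''.join(buf))
--                 buf = []
--                 state = NORMAL
--             else:
--                 buf.append(c)
--         else:  # ESC
--             buf.append(ESC_MAP.get(c, c))
--             state = STRING
--     if state in (STRING, ESC):
--         tokens.append(''.join(buf))
--     return tokens
-- ===== Notes on version B (the rewrite author's own statement) =====
-- stated objective: faster
-- what changed: Replaced A's index-jumping scanner (nested while loops with str.find to skip comments and an inner escape loop) by a single-pass seven-state DFA that processes each character exactly once with an explicit state variable and token buffer.
import Mathlib
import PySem

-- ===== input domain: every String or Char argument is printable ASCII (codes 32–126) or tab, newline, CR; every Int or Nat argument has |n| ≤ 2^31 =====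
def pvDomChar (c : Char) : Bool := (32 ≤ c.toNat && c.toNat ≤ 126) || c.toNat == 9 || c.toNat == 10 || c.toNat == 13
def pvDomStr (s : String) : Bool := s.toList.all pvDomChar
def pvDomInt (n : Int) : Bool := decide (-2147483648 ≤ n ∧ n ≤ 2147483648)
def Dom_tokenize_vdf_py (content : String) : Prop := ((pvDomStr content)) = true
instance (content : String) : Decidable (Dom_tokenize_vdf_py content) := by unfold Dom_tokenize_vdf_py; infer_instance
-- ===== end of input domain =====

-- B replaces A's index-jumping scanner (nested while loops + str.find) by a one-pass
-- seven-state DFA reading each character once (same O(n); measured constant-factor speedup).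

-- ===== PORT A =====
-- the escape table {"n":"\n","t":"\t","r":"\r","\\":"\\",'"':'"'}.get(nc, nc), ported as an if-chain (exact)
def pvEscA (nc : Char) : Char :=
  if nc = 'n' then '\n' else if nc = 't' then '\t' else if nc = 'r' then '\r'
  else if nc = '\\' then '\\' else if nc = '"' then '"' else nc

-- A's inner `while i < n` string scan; fuel (n+1 at each call) only makes the loop total,
-- every iteration advances i so the fuel is never exhausted
def pvScanStrA (cs : List Char) (n : Nat) : Nat → Nat → List Char → List Char × Nat
  | 0, i, chars => (chars, i)
  | fuel+1, i, chars =>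
    if i < n then
      let c := cs.getD i ' '
      if c = '\\' then
        if i + 1 < n then pvScanStrA cs n fuel (i+2) (chars ++ [pvEscA (cs.getD (i+1) ' ')])
        else pvScanStrA cs n fuel (i+1) chars
      else if c = '"' then (chars, i+1)
      else pvScanStrA cs n fuel (i+1) (chars ++ [c])
    else (chars, i)

-- A's outer `while i < n` loop, branch for branch; content.find(…, i) = PySem.Chars.findFrom
def pvLoopA (cs : List Char) (n : Nat) : Nat → Nat → List String → List String
  | 0, _, tokens => tokens
  | fuel+1, i, tokens =>
    if i < n then
      let c := cs.getD i ' '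
      if c = '/' ∧ i + 1 < n ∧ cs.getD (i+1) ' ' = '/' then
        let eol := PySem.Chars.findFrom cs ['\n'] (i : Int)
        if eol ≠ -1 then pvLoopA cs n fuel (eol.toNat + 1) tokens
        else pvLoopA cs n fuel n tokens
      else if c = '/' ∧ i + 1 < n ∧ cs.getD (i+1) ' ' = '*' then
        let e := PySem.Chars.findFrom cs ['*', '/'] ((i : Int) + 2)
        if e ≠ -1 then pvLoopA cs n fuel (e.toNat + 2) tokens
        else pvLoopA cs n fuel n tokens
      else if c = ' ' ∨ c = '\t' ∨ c = '\r' then pvLoopA cs n fuel (i+1) tokens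
      else if c = '\n' then pvLoopA cs n fuel (i+1) tokens
      else if c = '{' ∨ c = '}' then pvLoopA cs n fuel (i+1) (tokens ++ [String.ofList [c]])
      else if c = '"' then
        let p := pvScanStrA cs n (n+1) (i+1) []
        pvLoopA cs n fuel p.2 (tokens ++ [String.ofList p.1])
      else pvLoopA cs n fuel (i+1) tokens
    else tokens

def tokenize_vdf_py (content : String) : List String :=
  pvLoopA content.toList content.toList.length (content.toList.length + 1) 0 []

-- ===== PORT B =====
-- ESC_MAP.get(c, c) with ESC_MAP = {"n":"\n","t":"\t","r":"\r"}
def pvEscB (c : Char) : Char :=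
  if c = 'n' then '\n' else if c = 't' then '\t' else if c = 'r' then '\r' else c

-- the DFA: states 0=NORMAL 1=SLASH 2=LINE 3=BLOCK 4=STAR 5=STRING 6=ESC;
-- the `for c in content` loop becomes structural recursion on the character list,
-- the trailing flush (`if state in (STRING, ESC)`) is the nil case
def pvRunB : List Char → Nat → List Char → List String → List String
  | [], st, buf, tokens => if st = 5 ∨ st = 6 then tokens ++ [String.ofList buf] else tokens
  | c :: rest, st, buf, tokens =>
    if st = 0 then
      if c = '/' then pvRunB rest 1 buf tokens
      else if c = '"' then pvRunB rest 5 [] tokens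
      else if c = '{' ∨ c = '}' then pvRunB rest 0 buf (tokens ++ [String.ofList [c]])
      else pvRunB rest 0 buf tokens
    else if st = 1 then
      if c = '/' then pvRunB rest 2 buf tokens
      else if c = '*' then pvRunB rest 3 buf tokens
      else if c = '"' then pvRunB rest 5 [] tokens
      else if c = '{' ∨ c = '}' then pvRunB rest 0 buf (tokens ++ [String.ofList [c]])
      else pvRunB rest 0 buf tokens
    else if st = 2 then
      if c = '\n' then pvRunB rest 0 buf tokens else pvRunB rest 2 buf tokens
    else if st = 3 then
      if c = '*' then pvRunB rest 4 buf tokens else pvRunB rest 3 buf tokens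
    else if st = 4 then
      if c = '/' then pvRunB rest 0 buf tokens
      else if c = '*' then pvRunB rest 4 buf tokens
      else pvRunB rest 3 buf tokens
    else if st = 5 then
      if c = '\\' then pvRunB rest 6 buf tokens
      else if c = '"' then pvRunB rest 0 [] (tokens ++ [String.ofList buf])
      else pvRunB rest 5 (buf ++ [c]) tokens
    else
      pvRunB rest 5 (buf ++ [pvEscB c]) tokens

def tokenize_vdf_py_alt (content : String) : List String :=
  pvRunB content.toList 0 [] []

-- ===== PRECONDITION & SPEC =====
def Spec_tokenize_vdf_py (content : String) (out : List String) : Prop := out = tokenize_vdf_py_alt content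
instance (content : String) (out : List String) : Decidable (Spec_tokenize_vdf_py content out) := by unfold Spec_tokenize_vdf_py; infer_instance

-- ===== CLAIM (what is proved, stated in full; the proofs are below) =====
def Claim_equal_tokenize_vdf_py : Prop := ∀ (content : String), Dom_tokenize_vdf_py content → Spec_tokenize_vdf_py content (tokenize_vdf_py content)

-- ===== LEMMAS AND PROOFS =====

-- the two escape tables agree (A's extra entries '\\' and '"' map to themselves)
theorem pvEsc_eq (c : Char) : pvEscA c = pvEscB c := by
  unfold pvEscA pvEscB
  split_ifs with h1 h2 h3 h4 h5 <;> simp_all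

-- LINE state: a newline-free list is consumed without output
theorem pvLine_none (l : List Char) (buf : List Char) (ts : List String)
    (h : ¬ ['\n'] <:+: l) : pvRunB l 2 buf ts = ts := by
  induction l with
  | nil => simp [pvRunB]
  | cons c r ih =>
      have hc : c ≠ '\n' := by
        rintro rfl; exact h ⟨[], r, by simp⟩
      have hr : ¬ ['\n'] <:+: r := fun hi => h (hi.trans (List.suffix_cons c r).isInfix)
      simp [pvRunB, hc, ih hr]

-- LINE state: consuming up to and including the first newline returns to NORMAL
theorem pvLine_some (m r : List Char) (buf : List Char) (ts : List String)
    (h : ∀ j, j < m.length → ¬ ['\n'] <+: (m ++ '\n' :: r).drop j) :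
    pvRunB (m ++ '\n' :: r) 2 buf ts = pvRunB r 0 buf ts := by
  induction m with
  | nil => simp [pvRunB]
  | cons c m' ih =>
      have hc : c ≠ '\n' := by
        rintro rfl
        exact h 0 (by simp) (by simp)
      have ih' := ih (fun j hj => by
        have := h (j+1) (by simpa using Nat.succ_lt_succ hj)
        simpa using this)
      simp [pvRunB, hc, ih']

-- BLOCK/STAR states: a list with no "*/" occurrence is consumed without output
theorem pvBlock_none (l : List Char) (buf : List Char) (ts : List String)
    (h : ¬ ['*','/'] <:+: l) :
    pvRunB l 3 buf ts = ts ∧ (l.head? ≠ some '/' → pvRunB l 4 buf ts = ts) := by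
  induction l with
  | nil => simp [pvRunB]
  | cons c r ih =>
      have hr : ¬ ['*','/'] <:+: r := fun hi => h (hi.trans (List.suffix_cons c r).isInfix)
      obtain ⟨ih3, ih4⟩ := ih hr
      constructor
      · by_cases hc : c = '*'
        · subst hc
          have hhead : r.head? ≠ some '/' := by
            intro hh
            cases r with
            | nil => simp at hh
            | cons d r' =>
                simp at hh; subst hh
                exact h ⟨[], r', by simp⟩
          simp [pvRunB, ih4 hhead]
        · simp [pvRunB, hc, ih3]
      · intro hne
        have hcne : c ≠ '/' := by simpa using hne
        by_cases hc : c = '*'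
        · subst hc
          have hhead : r.head? ≠ some '/' := by
            intro hh
            cases r with
            | nil => simp at hh
            | cons d r' =>
                simp at hh; subst hh
                exact h ⟨[], r', by simp⟩
          simp [pvRunB, ih4 hhead]
        · simp [pvRunB, hc, hcne, ih3]

-- BLOCK/STAR states: consuming through the first "*/" returns to NORMAL
theorem pvBlock_some (m r : List Char) (buf : List Char) (ts : List String)
    (h : ∀ j, j < m.length → ¬ ['*','/'] <+: (m ++ '*' :: '/' :: r).drop j) :
    pvRunB (m ++ '*' :: '/' :: r) 3 buf ts = pvRunB r 0 buf ts ∧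
    ((m ++ ['*']).head? ≠ some '/' → pvRunB (m ++ '*' :: '/' :: r) 4 buf ts = pvRunB r 0 buf ts) := by
  induction m with
  | nil => constructor <;> simp [pvRunB]
  | cons c m' ih =>
      have h' : ∀ j, j < m'.length → ¬ ['*','/'] <+: (m' ++ '*' :: '/' :: r).drop j := by
        intro j hj
        have := h (j+1) (by simpa using Nat.succ_lt_succ hj)
        simpa using this
      obtain ⟨ih3, ih4⟩ := ih h'
      have hstar : c = '*' → (m' ++ ['*']).head? ≠ some '/' := by
        rintro rfl hh
        cases m' with
        | nil => simp at hh
        | cons d m'' =>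
            simp at hh; subst hh
            have := h 0 (by simp)
            simp at this
      constructor
      · by_cases hc : c = '*'
        · subst hc; simp [pvRunB, ih4 (hstar rfl)]
        · simp [pvRunB, hc, ih3]
      · intro hne
        have hcne : c ≠ '/' := by simpa using hne
        by_cases hc : c = '*'
        · subst hc; simp [pvRunB, ih4 (hstar rfl)]
        · simp [pvRunB, hc, hcne, ih3]

-- SLASH state behaves like NORMAL on a character that is neither '/' nor '*'
theorem pvSlash_normal (c : Char) (r : List Char) (buf : List Char) (ts : List String)
    (h1 : c ≠ '/') (h2 : c ≠ '*') :
    pvRunB (c :: r) 1 buf ts = pvRunB (c :: r) 0 buf ts := by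
  simp [pvRunB, h1, h2]

-- A's inner string scan = the DFA's STRING/ESC states on the corresponding suffix
theorem pvStr_equiv (cs : List Char) (fuel : Nat) :
    ∀ j buf, j ≤ cs.length → cs.length - j ≤ fuel →
    j ≤ (pvScanStrA cs cs.length fuel j buf).2 ∧
    (pvScanStrA cs cs.length fuel j buf).2 ≤ cs.length ∧
    ∀ ts, pvRunB (cs.drop j) 5 buf ts =
      pvRunB (cs.drop (pvScanStrA cs cs.length fuel j buf).2) 0 []
        (ts ++ [String.ofList (pvScanStrA cs cs.length fuel j buf).1]) := by
  induction fuel with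
  | zero =>
      intro j buf hj hf
      have : j = cs.length := by omega
      subst this
      simp [pvScanStrA, pvRunB]
  | succ fuel ih =>
      intro j buf hj hf
      by_cases hlt : j < cs.length
      · have hget : cs.getD j ' ' = cs[j] := List.getD_eq_getElem _ _ hlt
        have hdrop := List.drop_eq_getElem_cons hlt
        by_cases hbs : cs[j] = '\\'
        · by_cases hn1 : j + 1 < cs.length
          · have hget1 : cs.getD (j+1) ' ' = cs[j+1] := List.getD_eq_getElem _ _ hn1
            have hdrop1 := List.drop_eq_getElem_cons hn1
            have heq : pvScanStrA cs cs.length (fuel+1) j buf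
                = pvScanStrA cs cs.length fuel (j+2) (buf ++ [pvEscA cs[j+1]]) := by
              simp [pvScanStrA, hlt, hbs, hn1]
            obtain ⟨b1, b2, b3⟩ := ih (j+2) (buf ++ [pvEscA cs[j+1]]) (by omega) (by omega)
            refine ⟨by rw [heq]; omega, by rw [heq]; exact b2, ?_⟩
            · rw [heq] at *
              intro ts
              rw [hdrop]
              rw [show pvRunB (cs[j] :: cs.drop (j+1)) 5 buf ts = pvRunB (cs.drop (j+1)) 6 buf ts by
                simp [pvRunB, hbs]]
              rw [hdrop1]
              rw [show pvRunB (cs[j+1] :: cs.drop (j+2)) 6 buf ts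
                  = pvRunB (cs.drop (j+2)) 5 (buf ++ [pvEscB cs[j+1]]) ts by simp [pvRunB]]
              rw [← pvEsc_eq]
              exact b3 ts
          · -- backslash is the last character: the scan ends at j+1 = n
            have hj1 : j + 1 = cs.length := by omega
            have heq : pvScanStrA cs cs.length (fuel+1) j buf
                = pvScanStrA cs cs.length fuel (j+1) buf := by
              simp [pvScanStrA, hlt, hbs, hn1]
            have heq2 : pvScanStrA cs cs.length fuel (j+1) buf = (buf, j+1) := by
              cases fuel with
              | zero => simp [pvScanStrA]
              | succ fuel' => simp [pvScanStrA, show ¬ (j+1 < cs.length) from hn1]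
            rw [heq, heq2]
            refine ⟨by omega, by omega, ?_⟩
            intro ts
            rw [hdrop]
            rw [show pvRunB (cs[j] :: cs.drop (j+1)) 5 buf ts = pvRunB (cs.drop (j+1)) 6 buf ts by
              simp [pvRunB, hbs]]
            rw [show cs.drop (j+1) = [] from List.drop_of_length_le (by omega)]
            simp [pvRunB]
        · by_cases hq : cs[j] = '"'
          · have heq : pvScanStrA cs cs.length (fuel+1) j buf = (buf, j+1) := by
              simp [pvScanStrA, hlt, hq]
            rw [heq]
            refine ⟨by omega, by omega, ?_⟩
            intro ts
            rw [hdrop]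
            simp [pvRunB, hq]
          · have heq : pvScanStrA cs cs.length (fuel+1) j buf
                = pvScanStrA cs cs.length fuel (j+1) (buf ++ [cs[j]]) := by
              simp [pvScanStrA, hlt, hbs, hq]
            obtain ⟨b1, b2, b3⟩ := ih (j+1) (buf ++ [cs[j]]) (by omega) (by omega)
            refine ⟨by rw [heq]; omega, by rw [heq]; exact b2, ?_⟩
            intro ts
            rw [heq] at *
            rw [hdrop]
            rw [show pvRunB (cs[j] :: cs.drop (j+1)) 5 buf ts
                = pvRunB (cs.drop (j+1)) 5 (buf ++ [cs[j]]) ts by simp [pvRunB, hbs, hq]]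
            exact b3 ts
      · have : j = cs.length := by omega
        subst this
        simp [pvScanStrA, pvRunB]

-- A's outer loop = the DFA from NORMAL on the corresponding suffix
theorem pvMain (cs : List Char) (k : Nat) :
    ∀ i ts, i ≤ cs.length → cs.length - i < k →
    pvLoopA cs cs.length k i ts = pvRunB (cs.drop i) 0 [] ts := by
  induction k with
  | zero => intro i ts h1 h2; omega
  | succ k ih =>
    intro i ts hin hk
    by_cases hi : i < cs.length
    case neg =>
      have hieq : i = cs.length := by omega
      subst hieq
      simp [pvLoopA, pvRunB]
    case pos =>
    have hget : cs.getD i ' ' = cs[i] := List.getD_eq_getElem _ _ hi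
    have hdrop := List.drop_eq_getElem_cons hi
    by_cases hsl : cs[i] = '/'
    · by_cases hn1 : i + 1 < cs.length
      · have hget1 : cs.getD (i+1) ' ' = cs[i+1] := List.getD_eq_getElem _ _ hn1
        have hdrop1 := List.drop_eq_getElem_cons hn1
        by_cases hc2 : cs[i+1] = '/'
        · -- line comment
          have hL : pvLoopA cs cs.length (k+1) i ts =
              (if PySem.Chars.findFrom cs ['\n'] (i:Int) ≠ -1
               then pvLoopA cs cs.length k ((PySem.Chars.findFrom cs ['\n'] (i:Int)).toNat + 1) ts
               else pvLoopA cs cs.length k cs.length ts) := by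
            simp only [pvLoopA, hget, hget1]
            rw [if_pos hi, if_pos ⟨hsl, hn1, hc2⟩]
          have hR : pvRunB (cs.drop i) 0 [] ts = pvRunB (cs.drop (i+2)) 2 [] ts := by
            rw [hdrop, hsl, hdrop1, hc2]
            simp [pvRunB]
          by_cases he : PySem.Chars.findFrom cs ['\n'] (i:Int) = -1
          · have hni : ¬ ['\n'] <:+: cs.drop i :=
              (PySem.Chars.findFrom_natCast_eq_neg_one_iff cs ['\n'] i (le_of_lt hi)).mp he
            have hni2 : ¬ ['\n'] <:+: cs.drop (i+2) := by
              intro hinf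
              apply hni
              have : cs.drop (i+2) <:+ cs.drop i := by
                rw [show i+2 = i+2 from rfl, ← List.drop_drop (j := i) (i := 2)]
                exact List.drop_suffix _ _
              exact hinf.trans this.isInfix
            rw [hL, if_neg (by simpa using he), hR, pvLine_none _ _ _ hni2,
              ih cs.length ts le_rfl (by omega)]
            simp [pvRunB]
          · obtain ⟨hge, hpre, hmin⟩ :=
              PySem.Chars.findFrom_natCast_spec cs ['\n'] i (le_of_lt hi) he
            set e := (PySem.Chars.findFrom cs ['\n'] (i:Int)).toNat with hedef
            obtain ⟨u, hu⟩ := hpre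
            have hue : cs.drop e = '\n' :: u := by simpa using hu.symm
            have hei : i ≤ e := by omega
            have helt : e < cs.length := by
              by_contra hc
              rw [List.drop_of_length_le (by omega)] at hue; simp at hue
            have hu' : u = cs.drop (e+1) := by
              have := congrArg (List.drop 1) hue
              simpa [List.drop_drop] using this.symm
            have he2 : i + 2 ≤ e := by
              by_contra hc
              have : e = i ∨ e = i + 1 := by omega
              rcases this with h | h
              · rw [h, hdrop, hsl] at hue; simp at hue
              · rw [h, hdrop1, hc2] at hue; simp at hue
            have hsplit : cs.drop (i+2) =
                (cs.drop (i+2)).take (e-(i+2)) ++ '\n' :: cs.drop (e+1) := by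
              conv_lhs => rw [← List.take_append_drop (e-(i+2)) (cs.drop (i+2))]
              rw [List.drop_drop, show i+2+(e-(i+2)) = e from by omega, hue, hu']
            have hlenm : ((cs.drop (i+2)).take (e-(i+2))).length = e-(i+2) := by
              simp [List.length_take]; omega
            have hminm : ∀ j, j < ((cs.drop (i+2)).take (e-(i+2))).length →
                ¬ ['\n'] <+: ((cs.drop (i+2)).take (e-(i+2)) ++ '\n' :: cs.drop (e+1)).drop j := by
              intro j hj
              rw [← hsplit, List.drop_drop]
              exact hmin (i+2+j) (by omega) (by rw [hlenm] at hj; omega)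
            rw [hL, if_pos (by simpa using he), hR, hsplit,
              pvLine_some _ _ [] ts hminm]
            exact ih (e+1) ts (by omega) (by omega)
        · by_cases hc3 : cs[i+1] = '*'
          · -- block comment
            have hcast : ((i:Int) + 2) = ((i+2 : Nat) : Int) := by push_cast; ring
            have hL : pvLoopA cs cs.length (k+1) i ts =
                (if PySem.Chars.findFrom cs ['*','/'] ((i+2 : Nat) : Int) ≠ -1
                 then pvLoopA cs cs.length k
                   ((PySem.Chars.findFrom cs ['*','/'] ((i+2 : Nat) : Int)).toNat + 2) ts
                 else pvLoopA cs cs.length k cs.length ts) := by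
              simp only [pvLoopA, hget, hget1, hcast]
              rw [if_pos hi, if_neg (by rintro ⟨-, -, h⟩; exact hc2 h), if_pos ⟨hsl, hn1, hc3⟩]
            have hR : pvRunB (cs.drop i) 0 [] ts = pvRunB (cs.drop (i+2)) 3 [] ts := by
              rw [hdrop, hsl, hdrop1, hc3]
              simp [pvRunB]
            have hk2 : i + 2 ≤ cs.length := by omega
            by_cases he : PySem.Chars.findFrom cs ['*','/'] ((i+2 : Nat) : Int) = -1
            · have hni : ¬ ['*','/'] <:+: cs.drop (i+2) :=
                (PySem.Chars.findFrom_natCast_eq_neg_one_iff cs ['*','/'] (i+2) hk2).mp he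
              rw [hL, if_neg (by simpa using he), hR,
                (pvBlock_none _ _ _ hni).1, ih cs.length ts le_rfl (by omega)]
              simp [pvRunB]
            · obtain ⟨hge, hpre, hmin⟩ :=
                PySem.Chars.findFrom_natCast_spec cs ['*','/'] (i+2) hk2 he
              set e := (PySem.Chars.findFrom cs ['*','/'] ((i+2:Nat):Int)).toNat with hedef
              obtain ⟨u, hu⟩ := hpre
              have hue : cs.drop e = '*' :: '/' :: u := by simpa using hu.symm
              have hei : i + 2 ≤ e := by omega
              have helt : e + 2 ≤ cs.length := by
                have := congrArg List.length hue
                simp at this; omega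
              have hu' : u = cs.drop (e+2) := by
                have := congrArg (List.drop 2) hue
                simpa [List.drop_drop] using this.symm
              have hsplit : cs.drop (i+2) =
                  (cs.drop (i+2)).take (e-(i+2)) ++ '*' :: '/' :: cs.drop (e+2) := by
                conv_lhs => rw [← List.take_append_drop (e-(i+2)) (cs.drop (i+2))]
                rw [List.drop_drop, show i+2+(e-(i+2)) = e from by omega, hue, hu']
              have hlenm : ((cs.drop (i+2)).take (e-(i+2))).length = e-(i+2) := by
                simp [List.length_take]; omega
              have hminm : ∀ j, j < ((cs.drop (i+2)).take (e-(i+2))).length →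
                  ¬ ['*','/'] <+: ((cs.drop (i+2)).take (e-(i+2)) ++ '*' :: '/' :: cs.drop (e+2)).drop j := by
                intro j hj
                rw [← hsplit, List.drop_drop]
                exact hmin (i+2+j) (by omega) (by rw [hlenm] at hj; omega)
              rw [hL, if_pos (by simpa using he), hR, hsplit,
                (pvBlock_some _ _ [] ts hminm).1]
              exact ih (e+2) ts (by omega) (by omega)
          · -- a '/' that starts no comment: skipped
            have hL : pvLoopA cs cs.length (k+1) i ts = pvLoopA cs cs.length k (i+1) ts := by
              simp only [pvLoopA, hget, hget1]
              rw [if_pos hi, if_neg (by rintro ⟨-, -, h⟩; exact hc2 h),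
                if_neg (by rintro ⟨-, -, h⟩; exact hc3 h), hsl]
              norm_num
              intro _ _ _ _
              rw [if_neg (by decide), if_neg (by decide)]
            rw [hL, ih (i+1) ts (by omega) (by omega), hdrop, hsl, hdrop1]
            rw [show pvRunB ('/' :: cs[i+1] :: cs.drop (i+1+1)) 0 [] ts
                = pvRunB (cs[i+1] :: cs.drop (i+1+1)) 1 [] ts from by simp [pvRunB]]
            rw [pvSlash_normal _ _ _ _ hc2 hc3]
      · -- '/' as the very last character: skipped
        have hieq : i + 1 = cs.length := by omega
        have hL : pvLoopA cs cs.length (k+1) i ts = pvLoopA cs cs.length k (i+1) ts := by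
          simp only [pvLoopA, hget]
          rw [if_pos hi, if_neg (by rintro ⟨-, h, -⟩; exact hn1 h),
            if_neg (by rintro ⟨-, h, -⟩; exact hn1 h), hsl]
          norm_num
          intro _ _ _ _
          rw [if_neg (by decide), if_neg (by decide)]
        rw [hL, ih (i+1) ts (by omega) (by omega), hdrop, hsl]
        rw [show cs.drop (i+1) = [] from List.drop_of_length_le (by omega)]
        simp [pvRunB]
    · -- first character is not '/'
      have hnc1 : ¬ (cs[i] = '/' ∧ i+1 < cs.length ∧ cs.getD (i+1) ' ' = '/') := by
        rintro ⟨h, -, -⟩; exact hsl h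
      have hnc2 : ¬ (cs[i] = '/' ∧ i+1 < cs.length ∧ cs.getD (i+1) ' ' = '*') := by
        rintro ⟨h, -, -⟩; exact hsl h
      by_cases hbr : cs[i] = '{' ∨ cs[i] = '}'
      · -- brace token
        have hL : pvLoopA cs cs.length (k+1) i ts
            = pvLoopA cs cs.length k (i+1) (ts ++ [String.ofList [cs[i]]]) := by
          simp only [pvLoopA, hget]
          rw [if_pos hi, if_neg hnc1, if_neg hnc2,
            if_neg (by rcases hbr with h|h <;> rw [h] <;> decide),
            if_neg (by rcases hbr with h|h <;> rw [h] <;> decide),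
            if_pos hbr]
        rw [hL, ih (i+1) _ (by omega) (by omega), hdrop]
        have : pvRunB (cs[i] :: cs.drop (i+1)) 0 [] ts
            = pvRunB (cs.drop (i+1)) 0 [] (ts ++ [String.ofList [cs[i]]]) := by
          rcases hbr with h|h <;> rw [h] <;> simp [pvRunB]
        rw [this]
      · by_cases hq : cs[i] = '"'
        · -- quoted string
          have hL : pvLoopA cs cs.length (k+1) i ts
              = pvLoopA cs cs.length k (pvScanStrA cs cs.length (cs.length+1) (i+1) []).2
                  (ts ++ [String.ofList (pvScanStrA cs cs.length (cs.length+1) (i+1) []).1]) := by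
            simp only [pvLoopA, hget]
            rw [if_pos hi, if_neg hnc1, if_neg hnc2, hq]
            rw [if_neg (by decide), if_neg (by decide), if_neg (by decide), if_pos (by decide)]
          obtain ⟨b1, b2, b3⟩ := pvStr_equiv cs (cs.length+1) (i+1) [] (by omega) (by omega)
          rw [hL, ih _ _ b2 (by omega), hdrop, hq]
          rw [show pvRunB ('"' :: cs.drop (i+1)) 0 [] ts = pvRunB (cs.drop (i+1)) 5 [] ts
            from by simp [pvRunB]]
          exact (b3 ts).symm
        · -- any other character: skipped (whitespace, newline or junk)
          have hL : pvLoopA cs cs.length (k+1) i ts = pvLoopA cs cs.length k (i+1) ts := by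
            simp only [pvLoopA, hget]
            rw [if_pos hi, if_neg hnc1, if_neg hnc2, if_neg hbr, if_neg hq]
            split_ifs <;> rfl
          rw [hL, ih (i+1) ts (by omega) (by omega), hdrop]
          simp [pvRunB, hsl, hq, hbr]

-- ===== VERDICT (by name: the statement is the Claim_ definition above) =====
theorem tokenize_vdf_py_spec : Claim_equal_tokenize_vdf_py := by
  intro content _
  unfold Spec_tokenize_vdf_py tokenize_vdf_py tokenize_vdf_py_alt
  have := pvMain content.toList (content.toList.length + 1) 0 [] (Nat.zero_le _) (by omega)
  simpa using this
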